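-- pv_equiv track=rewrite | github.com/oscarsorensen/AI-Oscar-2.0 | Oscar-WIO/build_persona_profile.py | infer_values
-- ===== SOURCE A (Python) =====
-- def infer_values(keywords: list[str]) -> list[str]:
--     buckets = {
--         "learning": {"learning", "study", "school", "education", "progress", "skills", "practice"},
--         "building": {"build", "system", "project", "implementation", "product", "prototype"},
--         "autonomy": {"autonomy", "independent", "freedom", "self", "ownership"},
--         "efficiency": {"efficient", "efficiency", "optimize", "focus", "priority", "output"},
--         "clarity": {"clarity", "structure", "logic", "rigor", "analysis"},
--     }
--     present = []
--     kw = set(keywords)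
--     for name, trigger in buckets.items():
--         if kw & trigger:
--             present.append(name)
--     return present
-- ===== SOURCE B (Python) =====
-- # B classifies each keyword directly to a bucket INDEX via a chain of membership
-- # tests (no bucket table, no set intersections), records hit indices, and emits
-- # the names by indexing a fixed name list over range(5).
-- _NAMES = ["learning", "building", "autonomy", "efficiency", "clarity"]
--
-- def _bucket_of(w):
--     if w in ("learning", "study", "school", "education", "progress", "skills", "practice"):
--         return 0
--     if w in ("build", "system", "project", "implementation", "product", "prototype"):
--         return 1
--     if w in ("autonomy", "independent", "freedom", "self", "ownership"):
--         return 2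
--     if w in ("efficient", "efficiency", "optimize", "focus", "priority", "output"):
--         return 3
--     if w in ("clarity", "structure", "logic", "rigor", "analysis"):
--         return 4
--     return -1
--
-- def infer_values(keywords: list[str]) -> list[str]:
--     hit = set()
--     for k in keywords:
--         b = _bucket_of(k)
--         if b >= 0:
--             hit.add(b)
--     return [_NAMES[i] for i in range(5) if i in hit]
-- ===== Notes on version B (the rewrite author's own statement) =====
-- stated objective: alternative
-- what changed: B drops the bucket table entirely: a classifier function maps each keyword straight to a bucket index by a chain of membership tests, one pass collects the hit indices, and the result is built by indexing a fixed name list over range(5).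
import Mathlib
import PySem

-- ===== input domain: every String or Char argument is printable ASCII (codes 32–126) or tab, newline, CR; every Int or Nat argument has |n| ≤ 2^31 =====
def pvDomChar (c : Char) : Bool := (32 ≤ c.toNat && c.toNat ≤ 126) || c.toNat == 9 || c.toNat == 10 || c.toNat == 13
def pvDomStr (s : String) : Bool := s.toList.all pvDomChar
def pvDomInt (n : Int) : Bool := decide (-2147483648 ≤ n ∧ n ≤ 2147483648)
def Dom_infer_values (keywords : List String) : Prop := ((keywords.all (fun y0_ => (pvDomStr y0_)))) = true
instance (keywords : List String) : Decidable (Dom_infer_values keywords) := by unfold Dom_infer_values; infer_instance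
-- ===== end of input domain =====

-- B drops A's bucket table: a classifier maps each keyword straight to a bucket
-- index, one pass collects the hit indices, and names are emitted over range(5).

-- ===== PORT A =====
-- the five buckets, name ↦ trigger set (Python set literals; elements are distinct)
def pvBucketsA : List (String × PySem.Set String) :=
  [("learning", PySem.Set.ofList ["learning", "study", "school", "education", "progress", "skills", "practice"]),
   ("building", PySem.Set.ofList ["build", "system", "project", "implementation", "product", "prototype"]),
   ("autonomy", PySem.Set.ofList ["autonomy", "independent", "freedom", "self", "ownership"]),
   ("efficiency", PySem.Set.ofList ["efficient", "efficiency", "optimize", "focus", "priority", "output"]),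
   ("clarity", PySem.Set.ofList ["clarity", "structure", "logic", "rigor", "analysis"])]

def infer_values (keywords : List String) : List String :=
  let kw : PySem.Set String := PySem.Set.ofList keywords
  pvBucketsA.foldl (fun present nt =>
    if PySem.Set.inter kw nt.2 ≠ [] then present ++ [nt.1] else present) []

-- ===== PORT B =====
def pvNames : List String := ["learning", "building", "autonomy", "efficiency", "clarity"]

-- _bucket_of: chain of tuple-membership tests, index of the bucket or -1
def pvBucketOf (w : String) : Int :=
  if w ∈ ["learning", "study", "school", "education", "progress", "skills", "practice"] then 0
  else if w ∈ ["build", "system", "project", "implementation", "product", "prototype"] then 1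
  else if w ∈ ["autonomy", "independent", "freedom", "self", "ownership"] then 2
  else if w ∈ ["efficient", "efficiency", "optimize", "focus", "priority", "output"] then 3
  else if w ∈ ["clarity", "structure", "logic", "rigor", "analysis"] then 4
  else -1

def infer_values_alt (keywords : List String) : List String :=
  let hit : PySem.Set Int := keywords.foldl (fun hit k =>
    if pvBucketOf k ≥ 0 then PySem.Set.add hit (pvBucketOf k) else hit) PySem.Set.empty
  -- [_NAMES[i] for i in range(5) if i in hit]; every i is in range of _NAMES, so pyGetD is exact
  ((PySem.List.pyRange 0 5 1).filter (fun i => hit.contains i)).map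
    (fun i => PySem.List.pyGetD pvNames i "")

-- ===== PRECONDITION & SPEC =====
def Spec_infer_values (keywords : List String) (out : List String) : Prop := out = infer_values_alt keywords
instance (keywords : List String) (out : List String) : Decidable (Spec_infer_values keywords out) := by unfold Spec_infer_values; infer_instance

-- ===== CLAIM (what is proved, stated in full; the proofs are below) =====
def Claim_equal_infer_values : Prop := ∀ (keywords : List String), Dom_infer_values keywords → Spec_infer_values keywords (infer_values keywords)

-- ===== LEMMAS AND PROOFS =====

-- A's per-bucket test: the intersection is nonempty iff some keyword is a trigger
theorem inter_ne_nil_iff (keywords : List String) (t : PySem.Set String) :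
    (PySem.Set.inter (PySem.Set.ofList keywords) t ≠ []) ↔ ∃ k ∈ keywords, k ∈ t := by
  rw [← List.isEmpty_eq_false_iff, List.isEmpty_eq_false_iff_exists_mem]
  constructor
  · rintro ⟨x, hx⟩
    rw [PySem.Set.mem_inter] at hx
    exact ⟨x, (PySem.Set.mem_ofList _ _).mp hx.1, hx.2⟩
  · rintro ⟨x, hx, ht⟩
    exact ⟨x, (PySem.Set.mem_inter _ _ _).mpr ⟨(PySem.Set.mem_ofList _ _).mpr hx, ht⟩⟩

-- the classifier hits index i exactly on bucket i's trigger words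
theorem bucket0 (k : String) : pvBucketOf k = 0 ↔
    k ∈ ["learning", "study", "school", "education", "progress", "skills", "practice"] := by
  constructor
  · intro h; unfold pvBucketOf at h
    split_ifs at h with h1 h2 h3 h4 h5 <;> first | assumption | omega
  · intro hk; fin_cases hk <;> decide

theorem bucket1 (k : String) : pvBucketOf k = 1 ↔
    k ∈ ["build", "system", "project", "implementation", "product", "prototype"] := by
  constructor
  · intro h; unfold pvBucketOf at h
    split_ifs at h with h1 h2 h3 h4 h5 <;> first | assumption | omega
  · intro hk; fin_cases hk <;> decide

theorem bucket2 (k : String) : pvBucketOf k = 2 ↔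
    k ∈ ["autonomy", "independent", "freedom", "self", "ownership"] := by
  constructor
  · intro h; unfold pvBucketOf at h
    split_ifs at h with h1 h2 h3 h4 h5 <;> first | assumption | omega
  · intro hk; fin_cases hk <;> decide

theorem bucket3 (k : String) : pvBucketOf k = 3 ↔
    k ∈ ["efficient", "efficiency", "optimize", "focus", "priority", "output"] := by
  constructor
  · intro h; unfold pvBucketOf at h
    split_ifs at h with h1 h2 h3 h4 h5 <;> first | assumption | omega
  · intro hk; fin_cases hk <;> decide

theorem bucket4 (k : String) : pvBucketOf k = 4 ↔
    k ∈ ["clarity", "structure", "logic", "rigor", "analysis"] := by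
  constructor
  · intro h; unfold pvBucketOf at h
    split_ifs at h with h1 h2 h3 h4 h5 <;> first | assumption | omega
  · intro hk; fin_cases hk <;> decide

-- membership in the hit set built by B's fold
theorem mem_hit_fold (keywords : List String) (s : PySem.Set Int) (i : Int) :
    (i ∈ keywords.foldl (fun hit k =>
      if pvBucketOf k ≥ 0 then PySem.Set.add hit (pvBucketOf k) else hit) s) ↔
    i ∈ s ∨ (0 ≤ i ∧ ∃ k ∈ keywords, pvBucketOf k = i) := by
  induction keywords generalizing s with
  | nil => simp
  | cons k ks ih =>
    simp only [List.foldl_cons, List.mem_cons, ih]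
    by_cases h : pvBucketOf k ≥ 0
    · simp only [if_pos h, PySem.Set.mem_add]
      constructor
      · rintro (((h1 | rfl) | ⟨hi, k', hk', hg⟩))
        · exact Or.inl h1
        · exact Or.inr ⟨h, k, Or.inl rfl, rfl⟩
        · exact Or.inr ⟨hi, k', Or.inr hk', hg⟩
      · rintro (h1 | ⟨hi, k', (rfl | hk'), hg⟩)
        · exact Or.inl (Or.inl h1)
        · exact Or.inl (Or.inr hg.symm)
        · exact Or.inr ⟨hi, k', hk', hg⟩
    · simp only [if_neg h]
      constructor
      · rintro (h1 | ⟨hi, k', hk', hg⟩)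
        · exact Or.inl h1
        · exact Or.inr ⟨hi, k', Or.inr hk', hg⟩
      · rintro (h1 | ⟨hi, k', (rfl | hk'), hg⟩)
        · exact Or.inl h1
        · exact absurd (hg ▸ hi) h
        · exact Or.inr ⟨hi, k', hk', hg⟩

-- B's per-index tests, phrased as A's conditions
theorem hitB0 (ks : List String) :
    ((ks.foldl (fun hit k =>
      if pvBucketOf k ≥ 0 then PySem.Set.add hit (pvBucketOf k) else hit)
      PySem.Set.empty).contains 0 = true) ↔
    ∃ k ∈ ks, k ∈ ["learning", "study", "school", "education", "progress", "skills", "practice"] := by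
  rw [PySem.Set.contains_iff, mem_hit_fold]
  simp [PySem.Set.empty, bucket0]

theorem hitB1 (ks : List String) :
    ((ks.foldl (fun hit k =>
      if pvBucketOf k ≥ 0 then PySem.Set.add hit (pvBucketOf k) else hit)
      PySem.Set.empty).contains 1 = true) ↔
    ∃ k ∈ ks, k ∈ ["build", "system", "project", "implementation", "product", "prototype"] := by
  rw [PySem.Set.contains_iff, mem_hit_fold]
  simp [PySem.Set.empty, bucket1]

theorem hitB2 (ks : List String) :
    ((ks.foldl (fun hit k =>
      if pvBucketOf k ≥ 0 then PySem.Set.add hit (pvBucketOf k) else hit)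
      PySem.Set.empty).contains 2 = true) ↔
    ∃ k ∈ ks, k ∈ ["autonomy", "independent", "freedom", "self", "ownership"] := by
  rw [PySem.Set.contains_iff, mem_hit_fold]
  simp [PySem.Set.empty, bucket2]

theorem hitB3 (ks : List String) :
    ((ks.foldl (fun hit k =>
      if pvBucketOf k ≥ 0 then PySem.Set.add hit (pvBucketOf k) else hit)
      PySem.Set.empty).contains 3 = true) ↔
    ∃ k ∈ ks, k ∈ ["efficient", "efficiency", "optimize", "focus", "priority", "output"] := by
  rw [PySem.Set.contains_iff, mem_hit_fold]
  simp [PySem.Set.empty, bucket3]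

theorem hitB4 (ks : List String) :
    ((ks.foldl (fun hit k =>
      if pvBucketOf k ≥ 0 then PySem.Set.add hit (pvBucketOf k) else hit)
      PySem.Set.empty).contains 4 = true) ↔
    ∃ k ∈ ks, k ∈ ["clarity", "structure", "logic", "rigor", "analysis"] := by
  rw [PySem.Set.contains_iff, mem_hit_fold]
  simp [PySem.Set.empty, bucket4]

-- ===== VERDICT (by name: the statement is the Claim_ definition above) =====
set_option maxHeartbeats 1000000 in
theorem infer_values_spec : Claim_equal_infer_values := by
  intro keywords _
  unfold Spec_infer_values infer_values infer_values_alt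
  rw [show PySem.List.pyRange 0 5 1 = [0, 1, 2, 3, 4] from by decide]
  simp only [pvBucketsA, List.foldl_cons, List.foldl_nil,
    inter_ne_nil_iff, PySem.Set.mem_ofList,
    List.filter_cons, List.filter_nil,
    hitB0, hitB1, hitB2, hitB3, hitB4]
  split_ifs <;> decide
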